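-- pv_equiv track=rewrite | github.com/FR22Karam/xsx | 1233.py | noAlpha
-- ===== SOURCE A (Python) =====
-- def noAlpha(st):
--
--     st1=''
--     for i in st:
--
--         if(i>='a' and i<='z' or i>='A' and i<='Z'):
--
--
--            st1+=i
--
--         else:
--
--              st1=''
--     return st1
-- ===== SOURCE B (Python) =====
-- def noAlpha(st):
--     out = []
--     for i in reversed(st):
--         if 'a' <= i <= 'z' or 'A' <= i <= 'Z':
--             out.append(i)
--         else:
--             break
--     out.reverse()
--     return ''.join(out)
-- ===== Notes on version B (the rewrite author's own statement) =====
-- stated objective: idiomatic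
-- what changed: B scans backward from the end and stops at the first non-letter (collecting then reversing), instead of A's forward scan that resets the accumulator at every non-letter.
import Mathlib
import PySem

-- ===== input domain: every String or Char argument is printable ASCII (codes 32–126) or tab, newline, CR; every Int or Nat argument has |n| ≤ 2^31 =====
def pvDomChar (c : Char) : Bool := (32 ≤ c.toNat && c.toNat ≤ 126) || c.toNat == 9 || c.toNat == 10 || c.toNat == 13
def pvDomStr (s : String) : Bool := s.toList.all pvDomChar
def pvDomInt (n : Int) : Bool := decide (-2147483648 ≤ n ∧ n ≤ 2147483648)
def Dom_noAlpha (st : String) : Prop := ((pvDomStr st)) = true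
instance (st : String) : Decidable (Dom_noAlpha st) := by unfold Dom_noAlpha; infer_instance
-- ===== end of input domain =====

-- B scans backward from the end and stops at the first non-letter, instead of A's
-- forward scan that resets its accumulator at every non-letter (idiomatic rewrite).

-- the literal ASCII letter test of both Pythons: 'a'<=i<='z' or 'A'<=i<='Z'
def pvIsAlpha (c : Char) : Bool := ('a' ≤ c && c ≤ 'z') || ('A' ≤ c && c ≤ 'Z')

-- ===== PORT A =====
-- st1 += i / st1 = '' on a List Char accumulator; String.mk at the end (exact for str concat)
def noAlpha (st : String) : String :=
  String.mk (st.toList.foldl (fun st1 i => if pvIsAlpha i then st1 ++ [i] else []) [])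

-- ===== PORT B =====
-- the backward loop with break: collect letters, stop at the first non-letter
def pvCollect : List Char → List Char
  | [] => []
  | c :: t => if pvIsAlpha c then c :: pvCollect t else []

def noAlpha_alt (st : String) : String :=
  String.mk (pvCollect st.toList.reverse).reverse

-- ===== PRECONDITION & SPEC =====
def Spec_noAlpha (st : String) (out : String) : Prop := out = noAlpha_alt st
instance (st : String) (out : String) : Decidable (Spec_noAlpha st out) := by unfold Spec_noAlpha; infer_instance

-- ===== CLAIM (what is proved, stated in full; the proofs are below) =====
def Claim_equal_noAlpha : Prop := ∀ (st : String), Dom_noAlpha st → Spec_noAlpha st (noAlpha st)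

-- ===== LEMMAS AND PROOFS =====

theorem pvCollect_append (l r : List Char) :
    pvCollect (l ++ r) = if l.all pvIsAlpha then l ++ pvCollect r else pvCollect l := by
  induction l with
  | nil => simp
  | cons c t ih =>
    simp only [List.cons_append, pvCollect, List.all_cons, ih]
    by_cases hc : pvIsAlpha c <;> by_cases ht : t.all pvIsAlpha <;> simp [hc, ht]

theorem pvFoldl_eq (l acc : List Char) :
    l.foldl (fun st1 i => if pvIsAlpha i then st1 ++ [i] else []) acc
      = if l.all pvIsAlpha then acc ++ l else (pvCollect l.reverse).reverse := by
  induction l generalizing acc with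
  | nil => simp
  | cons c t ih =>
    simp only [List.foldl_cons, List.all_cons, List.reverse_cons]
    by_cases hc : pvIsAlpha c
    · rw [if_pos hc, ih]
      by_cases ht : t.all pvIsAlpha
      · simp [hc, ht]
      · simp [hc, ht, pvCollect_append]
    · rw [if_neg hc, ih]
      by_cases ht : t.all pvIsAlpha
      · simp [hc, ht, pvCollect_append, pvCollect]
      · simp [hc, ht, pvCollect_append]

theorem pvCollect_of_all (l : List Char) (h : l.all pvIsAlpha) : pvCollect l = l := by
  induction l with
  | nil => rfl
  | cons c t ih =>
    simp only [List.all_cons, Bool.and_eq_true] at h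
    simp [pvCollect, h.1, ih h.2]

-- ===== VERDICT (by name: the statement is the Claim_ definition above) =====
theorem noAlpha_spec : Claim_equal_noAlpha := by
  intro st _
  unfold Spec_noAlpha noAlpha noAlpha_alt
  rw [pvFoldl_eq]
  by_cases h : st.toList.all pvIsAlpha
  · rw [if_pos h, pvCollect_of_all _ (by simpa [List.all_reverse] using h)]
    simp
  · rw [if_neg h]
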